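-- pv_equiv track=rewrite | github.com/muneebshafique/Scheduling-Assistant | main.py | To_do_List
-- ===== SOURCE A (Python) =====
-- def convert_days_to_fullform(days):
--      #function converts convert (MT)-->[MONDAY,TUESDAY]
--     DAY=[]
--     map_days = {'M': ('Monday'),
--                 'T': ('Tuesday'),
--                 'W': ('Wednesday'),
--                 'R': ('Thursday'),
--                 'F': ('Friday'),
--                 'S': ('Saturday'),
--                 'U': ('Sunday')}
--     days=days.upper()
--     day=days.split()
--     for i in day:
--         DAY.append(map_days[i])
--     return(DAY)
--
-- def To_do_List(Reminders):
--     Reminders.pop(0)                                                              #removing the heading(reminder. Day, Time)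
--     Todolist ={}
--     Days_of_the_week=["MONDAY","TUESDAY","WEDNESDAY", "THURSDAY", "FRIDAY", "SATURDAY", "SUNDAY"]        #setting up the basic dictionary with days of the week
--     for day in Days_of_the_week:
--         Todolist[day]=[]
--
--     for i in range(len(Reminders)):
--         for j in range(len(Reminders[i])):
--             if j==1:                                                               #stopping at the second column where user has entered the days
--                 Repeat=convert_days_to_fullform(Reminders[i][j])                   #calling function to convert (MT)-->[MONDAY,TUESDAY]
--                 for day in Repeat:                                                 #Repeat is a list containing full form of days entered by user(repition days)
--                     day=day.upper()
--                                                                                         #coverting to uppercase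
--                     Todolist[day].append([Reminders[i][0],Reminders[i][2]])          #appending event,start time
--
--
--     for day in Todolist:
--         events=Todolist[day]
--         events.sort(key = lambda x: x[1])
--         Todolist[day]
--
--     return Todolist
-- ===== SOURCE B (Python) =====
-- DAY_MAP = {'M': 'MONDAY', 'T': 'TUESDAY', 'W': 'WEDNESDAY', 'R': 'THURSDAY',
--            'F': 'FRIDAY', 'S': 'SATURDAY', 'U': 'SUNDAY'}
-- WEEK = ['MONDAY', 'TUESDAY', 'WEDNESDAY', 'THURSDAY', 'FRIDAY', 'SATURDAY', 'SUNDAY']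
--
-- def To_do_List(Reminders):
--     Reminders.pop(0)                       # same in-place removal of the heading row as the original
--     entries = []
--     for row in Reminders:
--         if len(row) >= 2:
--             for code in row[1].upper().split():
--                 entries.append((DAY_MAP[code], [row[0], row[2]]))
--     return {day: sorted([e for d, e in entries if d == day], key=lambda x: x[1])
--             for day in WEEK}
-- ===== Notes on version B (the rewrite author's own statement) =====
-- stated objective: simpler
-- what changed: Replaces A's nested index loops that append into a mutated per-day dict (then sort each bucket in place) by a single flat pass collecting (day, [event, time]) entries followed by a per-weekday filter-and-sort comprehension; no dict is mutated.
import Mathlib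
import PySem

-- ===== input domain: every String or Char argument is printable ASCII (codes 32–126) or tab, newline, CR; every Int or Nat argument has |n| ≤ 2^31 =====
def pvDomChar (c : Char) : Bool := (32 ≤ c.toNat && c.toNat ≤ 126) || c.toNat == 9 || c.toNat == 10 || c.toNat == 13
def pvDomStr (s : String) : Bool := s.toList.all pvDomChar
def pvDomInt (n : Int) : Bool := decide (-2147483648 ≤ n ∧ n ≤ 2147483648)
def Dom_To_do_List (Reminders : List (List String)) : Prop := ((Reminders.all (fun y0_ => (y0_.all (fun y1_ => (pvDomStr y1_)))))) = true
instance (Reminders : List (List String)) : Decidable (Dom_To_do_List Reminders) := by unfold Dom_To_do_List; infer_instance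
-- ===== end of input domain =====

-- B replaces A's "append into a per-day dict while scanning rows, then sort each bucket" by
-- "build one flat (day, [event, time]) list in a single pass, then bucket by filtering per week day";
-- objective: simpler decomposition (no mutated dict). Both A and B pop the heading row from the
-- argument in place; the equivalence proved here is about the RETURN value (B performs the same mutation).

-- ===== PORT A =====
def pvMapDaysA : PySem.Dict String String :=
  PySem.Dict.ofList [("M","Monday"),("T","Tuesday"),("W","Wednesday"),("R","Thursday"),
                     ("F","Friday"),("S","Saturday"),("U","Sunday")]

def convert_days_to_fullform (days : String) : List String :=
  let days' := PySem.Str.upper days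
  let day := PySem.Str.split₀ days'
  -- map_days[i] raises KeyError on unknown codes: those inputs are excluded by Pre_; getD "" is total form
  day.foldl (fun DAY i => DAY ++ [pvMapDaysA.getD i ""]) []

def pvWeek : List String :=
  ["MONDAY","TUESDAY","WEDNESDAY","THURSDAY","FRIDAY","SATURDAY","SUNDAY"]

def To_do_List (Reminders : List (List String)) : List (String × List (List String)) :=
  match Reminders with
  | [] => []  -- Reminders.pop(0) raises IndexError here; excluded by Pre_
  | _ :: rest =>
    let d0 : PySem.Dict String (List (List String)) :=
      pvWeek.foldl (fun d day => d.insert day []) PySem.Dict.empty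
    let d1 := (PySem.List.pyRange 0 (PySem.List.len rest)).foldl (fun d i =>
        let row := PySem.List.pyGetD rest i []
        (PySem.List.pyRange 0 (PySem.List.len row)).foldl (fun d j =>
          if j == 1 then
            (convert_days_to_fullform (PySem.List.pyGetD row j "")).foldl
              (fun d day => d.modify (PySem.Str.upper day) []
                 (· ++ [[PySem.List.pyGetD row 0 "", PySem.List.pyGetD row 2 ""]])) d
          else d) d) d0
    let d2 := d1.keys.foldl (fun d day => d.modify day []
        (fun evs => PySem.List.sorted evs (fun x => PySem.List.pyGetD x 1 ""))) d1
    d2.items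

-- ===== PORT B =====
def pvDayMap : PySem.Dict String String :=
  PySem.Dict.ofList [("M","MONDAY"),("T","TUESDAY"),("W","WEDNESDAY"),("R","THURSDAY"),
                     ("F","FRIDAY"),("S","SATURDAY"),("U","SUNDAY")]

def To_do_List_alt (Reminders : List (List String)) : List (String × List (List String)) :=
  match Reminders with
  | [] => []  -- pop(0) raises here; excluded by Pre_
  | _ :: rest =>
    let entries : List (String × List String) := rest.foldl (fun acc row =>
      if 2 ≤ PySem.List.len row then
        (PySem.Str.split₀ (PySem.Str.upper (PySem.List.pyGetD row 1 ""))).foldl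
          (fun acc code => acc ++
            [(pvDayMap.getD code "", [PySem.List.pyGetD row 0 "", PySem.List.pyGetD row 2 ""])]) acc
      else acc) []
    pvWeek.map (fun day => (day,
      PySem.List.sorted ((entries.filter (fun p => p.1 == day)).map (·.2))
        (fun x => PySem.List.pyGetD x 1 "")))

-- ===== PRECONDITION & SPEC =====
def pvCodes : List String := ["M","T","W","R","F","S","U"]

-- Pre_ = exactly where the Python A returns: the list is nonempty (pop(0)), and in every data row
-- with at least 2 columns every whitespace-separated token of the uppercased day column is a valid
-- day code (else KeyError), and if there is at least one token the row has a 3rd column (else IndexError).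
def Pre_To_do_List (Reminders : List (List String)) : Prop :=
  Reminders ≠ [] ∧ ∀ row ∈ Reminders.tail, 2 ≤ row.length →
    (∀ t ∈ PySem.Str.split₀ (PySem.Str.upper (PySem.List.pyGetD row 1 "")), t ∈ pvCodes) ∧
    (PySem.Str.split₀ (PySem.Str.upper (PySem.List.pyGetD row 1 "")) ≠ [] → 3 ≤ row.length)
instance (Reminders : List (List String)) : Decidable (Pre_To_do_List Reminders) := by
  unfold Pre_To_do_List; infer_instance

def pvWitness_To_do_List : List (List String) :=
  [["Reminder","Day","Time"],["gym","M T","10:00"],["lunch","t","09:30"]]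

def Spec_To_do_List (Reminders : List (List String)) (out : List (String × List (List String))) : Prop := out = To_do_List_alt Reminders
instance (Reminders : List (List String)) (out : List (String × List (List String))) : Decidable (Spec_To_do_List Reminders out) := by unfold Spec_To_do_List; infer_instance

-- ===== CLAIM (what is proved, stated in full; the proofs are below) =====
def Claim_equal_To_do_List : Prop := ∀ (Reminders : List (List String)), Dom_To_do_List Reminders → Pre_To_do_List Reminders → Spec_To_do_List Reminders (To_do_List Reminders)

-- ===== LEMMAS AND PROOFS =====

-- the per-row flat entries, and the flat entry list of all rows (B's `entries`)
def pvEntries (row : List String) : List (String × List String) :=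
  (PySem.Str.split₀ (PySem.Str.upper (PySem.List.pyGetD row 1 ""))).map
    (fun t => (pvDayMap.getD t "", [PySem.List.pyGetD row 0 "", PySem.List.pyGetD row 2 ""]))

def pvFlat (rows : List (List String)) : List (String × List String) :=
  rows.flatMap (fun row => if 2 ≤ PySem.List.len row then pvEntries row else [])

def pvF (day : String) (l : List (String × List String)) : List (List String) :=
  (l.filter (fun p => p.1 == day)).map (·.2)

def mkWeek (v1 v2 v3 v4 v5 v6 v7 : List (List String)) : PySem.Dict String (List (List String)) :=
  PySem.Dict.mk [("MONDAY",v1),("TUESDAY",v2),("WEDNESDAY",v3),("THURSDAY",v4),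
                 ("FRIDAY",v5),("SATURDAY",v6),("SUNDAY",v7)]

-- A's inner j-loop fires only at j = 1, and only when the row has ≥ 2 columns
theorem pv_inner_loop_aux (g : Int → PySem.Dict String (List (List String)) → PySem.Dict String (List (List String)))
    (d : PySem.Dict String (List (List String))) (n : Nat) :
    (List.map (fun (k : Nat) => (k : Int)) (List.range n)).foldl
      (fun d j => if j == 1 then g j d else d) d
    = if 2 ≤ (n : Int) then g 1 d else d := by
  induction n with
  | zero => simp
  | succ n ih =>
    rw [List.range_succ, List.map_append, List.foldl_append, ih]
    match n with
    | 0 => simp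
    | 1 => norm_num
    | (k+2) =>
      have h1 : ¬((k:Int) + 2 = 1) := by omega
      have h2 : (2:Int) ≤ (k:Int) + 2 + 1 := by omega
      simp [h1, h2]

theorem pv_inner_loop (row : List String) (g : Int → PySem.Dict String (List (List String)) → PySem.Dict String (List (List String)))
    (d : PySem.Dict String (List (List String))) :
    (PySem.List.pyRange 0 (PySem.List.len row)).foldl
      (fun d j => if j == 1 then g j d else d) d
    = if 2 ≤ PySem.List.len row then g 1 d else d := by
  simp only [PySem.List.len, PySem.List.pyRange_zero_natCast]
  exact pv_inner_loop_aux g d row.length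

-- valid code: A's upper(map_days[t]) = B's DAY_MAP[t]
theorem pv_code_eq (t : String) (ht : t ∈ pvCodes) :
    PySem.Str.upper (pvMapDaysA.getD t "") = pvDayMap.getD t "" := by
  fin_cases ht <;> decide

theorem pv_code_week (t : String) (ht : t ∈ pvCodes) : pvDayMap.getD t "" ∈ pvWeek := by
  fin_cases ht <;> decide

-- A's per-row token loop = the modify-fold over that row's flat entries
theorem pv_row_eq (row : List String)
    (hrow : ∀ t ∈ PySem.Str.split₀ (PySem.Str.upper (PySem.List.pyGetD row 1 "")), t ∈ pvCodes)
    (d : PySem.Dict String (List (List String))) :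
    (convert_days_to_fullform (PySem.List.pyGetD row 1 "")).foldl
      (fun d day => d.modify (PySem.Str.upper day) []
        (· ++ [[PySem.List.pyGetD row 0 "", PySem.List.pyGetD row 2 ""]])) d
    = (pvEntries row).foldl (fun d p => d.modify p.1 [] (· ++ [p.2])) d := by
  have hconv : convert_days_to_fullform (PySem.List.pyGetD row 1 "")
      = (PySem.Str.split₀ (PySem.Str.upper (PySem.List.pyGetD row 1 ""))).map
          (fun i => pvMapDaysA.getD i "") := by
    simp only [convert_days_to_fullform]
    rw [PySem.List.foldl_append_singleton_eq_map]
    simp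
  rw [hconv]
  simp only [pvEntries]
  rw [List.foldl_map, List.foldl_map]
  exact PySem.List.foldl_congr_mem _ _ _ _
    (fun acc t ht => by rw [pv_code_eq t (hrow t ht)])

-- fold of per-row entry folds = fold over the flat list
theorem pv_foldl_flat {β : Type} (f : β → (String × List String) → β)
    (rows : List (List String)) (d : β) :
    rows.foldl (fun d row => if 2 ≤ PySem.List.len row then (pvEntries row).foldl f d else d) d
    = (pvFlat rows).foldl f d := by
  induction rows generalizing d with
  | nil => rfl
  | cons r rs ih =>
    simp only [pvFlat, List.flatMap_cons, List.foldl_append, List.foldl_cons]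
    rw [ih]
    simp only [PySem.List.len_eq]
    by_cases h : (2:Int) ≤ (r.length : Int)
    · simp [h, pvFlat]
    · simp [h, pvFlat]

-- B's append loop builds exactly the flat list
theorem pv_entries_flat (rows : List (List String)) (acc : List (String × List String)) :
    rows.foldl (fun acc row => if 2 ≤ PySem.List.len row then acc ++ pvEntries row else acc) acc
    = acc ++ pvFlat rows := by
  induction rows generalizing acc with
  | nil => simp [pvFlat]
  | cons r rs ih =>
    simp only [List.foldl_cons, pvFlat, List.flatMap_cons]
    rw [ih]
    simp only [PySem.List.len_eq]
    by_cases h : (2:Int) ≤ (r.length : Int)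
    · simp [h, pvFlat, List.append_assoc]
    · simp [h, pvFlat]

theorem pv_mod_mon (v1 v2 v3 v4 v5 v6 v7 : List (List String)) (e : List String) :
    (mkWeek v1 v2 v3 v4 v5 v6 v7).modify "MONDAY" [] (· ++ [e]) = mkWeek (v1 ++ [e]) v2 v3 v4 v5 v6 v7 := by
  simp [mkWeek, PySem.Dict.modify, PySem.Dict.insert, PySem.Dict.getD, PySem.Dict.get?, PySem.Dict.contains]

theorem pv_mod_tue (v1 v2 v3 v4 v5 v6 v7 : List (List String)) (e : List String) :
    (mkWeek v1 v2 v3 v4 v5 v6 v7).modify "TUESDAY" [] (· ++ [e]) = mkWeek v1 (v2 ++ [e]) v3 v4 v5 v6 v7 := by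
  simp [mkWeek, PySem.Dict.modify, PySem.Dict.insert, PySem.Dict.getD, PySem.Dict.get?, PySem.Dict.contains]

theorem pv_mod_wed (v1 v2 v3 v4 v5 v6 v7 : List (List String)) (e : List String) :
    (mkWeek v1 v2 v3 v4 v5 v6 v7).modify "WEDNESDAY" [] (· ++ [e]) = mkWeek v1 v2 (v3 ++ [e]) v4 v5 v6 v7 := by
  simp [mkWeek, PySem.Dict.modify, PySem.Dict.insert, PySem.Dict.getD, PySem.Dict.get?, PySem.Dict.contains]

theorem pv_mod_thu (v1 v2 v3 v4 v5 v6 v7 : List (List String)) (e : List String) :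
    (mkWeek v1 v2 v3 v4 v5 v6 v7).modify "THURSDAY" [] (· ++ [e]) = mkWeek v1 v2 v3 (v4 ++ [e]) v5 v6 v7 := by
  simp [mkWeek, PySem.Dict.modify, PySem.Dict.insert, PySem.Dict.getD, PySem.Dict.get?, PySem.Dict.contains]

theorem pv_mod_fri (v1 v2 v3 v4 v5 v6 v7 : List (List String)) (e : List String) :
    (mkWeek v1 v2 v3 v4 v5 v6 v7).modify "FRIDAY" [] (· ++ [e]) = mkWeek v1 v2 v3 v4 (v5 ++ [e]) v6 v7 := by
  simp [mkWeek, PySem.Dict.modify, PySem.Dict.insert, PySem.Dict.getD, PySem.Dict.get?, PySem.Dict.contains]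

theorem pv_mod_sat (v1 v2 v3 v4 v5 v6 v7 : List (List String)) (e : List String) :
    (mkWeek v1 v2 v3 v4 v5 v6 v7).modify "SATURDAY" [] (· ++ [e]) = mkWeek v1 v2 v3 v4 v5 (v6 ++ [e]) v7 := by
  simp [mkWeek, PySem.Dict.modify, PySem.Dict.insert, PySem.Dict.getD, PySem.Dict.get?, PySem.Dict.contains]

theorem pv_mod_sun (v1 v2 v3 v4 v5 v6 v7 : List (List String)) (e : List String) :
    (mkWeek v1 v2 v3 v4 v5 v6 v7).modify "SUNDAY" [] (· ++ [e]) = mkWeek v1 v2 v3 v4 v5 v6 (v7 ++ [e]) := by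
  simp [mkWeek, PySem.Dict.modify, PySem.Dict.insert, PySem.Dict.getD, PySem.Dict.get?, PySem.Dict.contains]

-- the bucketing fold on the week dict, characterised
theorem pv_bucket (l : List (String × List String)) (h : ∀ p ∈ l, p.1 ∈ pvWeek)
    (v1 v2 v3 v4 v5 v6 v7 : List (List String)) :
    l.foldl (fun d p => d.modify p.1 [] (· ++ [p.2])) (mkWeek v1 v2 v3 v4 v5 v6 v7)
    = mkWeek (v1 ++ pvF "MONDAY" l) (v2 ++ pvF "TUESDAY" l) (v3 ++ pvF "WEDNESDAY" l)
             (v4 ++ pvF "THURSDAY" l) (v5 ++ pvF "FRIDAY" l) (v6 ++ pvF "SATURDAY" l)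
             (v7 ++ pvF "SUNDAY" l) := by
  induction l generalizing v1 v2 v3 v4 v5 v6 v7 with
  | nil => simp [pvF]
  | cons p ps ih =>
    obtain ⟨a, b⟩ := p
    have hp : a ∈ pvWeek := h (a, b) (by simp)
    have hps : ∀ q ∈ ps, q.1 ∈ pvWeek := fun q hq => h q (by simp [hq])
    rw [List.foldl_cons]
    fin_cases hp <;>
      · simp only [pv_mod_mon, pv_mod_tue, pv_mod_wed, pv_mod_thu, pv_mod_fri, pv_mod_sat, pv_mod_sun]
        rw [ih hps]
        simp [pvF, List.append_assoc]

-- the final per-day in-place sort loop, on the explicit week dict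
theorem pv_sort_fold (w1 w2 w3 w4 w5 w6 w7 : List (List String)) :
    pvWeek.foldl (fun d day => d.modify day []
        (fun evs => PySem.List.sorted evs (fun x => PySem.List.pyGetD x 1 ""))) (mkWeek w1 w2 w3 w4 w5 w6 w7)
    = mkWeek (PySem.List.sorted w1 (fun x => PySem.List.pyGetD x 1 ""))
             (PySem.List.sorted w2 (fun x => PySem.List.pyGetD x 1 ""))
             (PySem.List.sorted w3 (fun x => PySem.List.pyGetD x 1 ""))
             (PySem.List.sorted w4 (fun x => PySem.List.pyGetD x 1 ""))
             (PySem.List.sorted w5 (fun x => PySem.List.pyGetD x 1 ""))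
             (PySem.List.sorted w6 (fun x => PySem.List.pyGetD x 1 ""))
             (PySem.List.sorted w7 (fun x => PySem.List.pyGetD x 1 "")) := by
  simp [pvWeek, mkWeek, PySem.Dict.modify, PySem.Dict.insert, PySem.Dict.getD, PySem.Dict.get?,
        PySem.Dict.contains]

-- every flat-entry key is a week day (under Pre_'s token validity)
theorem pv_flat_keys (rows : List (List String))
    (hpre : ∀ row ∈ rows, 2 ≤ row.length →
      ∀ t ∈ PySem.Str.split₀ (PySem.Str.upper (PySem.List.pyGetD row 1 "")), t ∈ pvCodes) :
    ∀ p ∈ pvFlat rows, p.1 ∈ pvWeek := by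
  intro p hp
  simp only [pvFlat, List.mem_flatMap] at hp
  obtain ⟨row, hrow, hmem⟩ := hp
  by_cases h : (2:Int) ≤ PySem.List.len row
  · rw [if_pos h] at hmem
    simp only [pvEntries, List.mem_map] at hmem
    obtain ⟨t, ht, rfl⟩ := hmem
    exact pv_code_week t (hpre row hrow (by simpa [PySem.List.len_eq] using h) t ht)
  · rw [if_neg h] at hmem
    exact absurd hmem (List.not_mem_nil)

-- ===== VERDICT (by name: the statement is the Claim_ definition above) =====
theorem To_do_List_spec : Claim_equal_To_do_List := by
  intro Reminders _ hpre
  unfold Spec_To_do_List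
  obtain ⟨hne, hrows⟩ := hpre
  match Reminders with
  | [] => exact absurd rfl hne
  | hd :: rest =>
    simp only [List.tail_cons] at hrows
    -- A side
    have hd0 : pvWeek.foldl (fun d day => d.insert day []) PySem.Dict.empty
        = mkWeek [] [] [] [] [] [] [] := by rfl
    have hA : To_do_List (hd :: rest)
        = (mkWeek (PySem.List.sorted (pvF "MONDAY" (pvFlat rest)) (fun x => PySem.List.pyGetD x 1 ""))
                  (PySem.List.sorted (pvF "TUESDAY" (pvFlat rest)) (fun x => PySem.List.pyGetD x 1 ""))
                  (PySem.List.sorted (pvF "WEDNESDAY" (pvFlat rest)) (fun x => PySem.List.pyGetD x 1 ""))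
                  (PySem.List.sorted (pvF "THURSDAY" (pvFlat rest)) (fun x => PySem.List.pyGetD x 1 ""))
                  (PySem.List.sorted (pvF "FRIDAY" (pvFlat rest)) (fun x => PySem.List.pyGetD x 1 ""))
                  (PySem.List.sorted (pvF "SATURDAY" (pvFlat rest)) (fun x => PySem.List.pyGetD x 1 ""))
                  (PySem.List.sorted (pvF "SUNDAY" (pvFlat rest)) (fun x => PySem.List.pyGetD x 1 ""))).items := by
      simp only [To_do_List]
      rw [PySem.List.foldl_pyRange_pyGetD rest []
        (fun (d : PySem.Dict String (List (List String))) (row : List String) =>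
          (PySem.List.pyRange 0 (PySem.List.len row)).foldl (fun d j =>
            if j == 1 then
              (convert_days_to_fullform (PySem.List.pyGetD row j "")).foldl
                (fun d day => d.modify (PySem.Str.upper day) []
                  (· ++ [[PySem.List.pyGetD row 0 "", PySem.List.pyGetD row 2 ""]])) d
            else d) d) _ (le_refl 0)]
      simp only [Int.toNat_zero, List.drop_zero]
      simp only [pv_inner_loop]
      rw [hd0]
      rw [PySem.List.foldl_congr_mem rest _
        (fun (d : PySem.Dict String (List (List String))) (row : List String) =>
          if 2 ≤ PySem.List.len row then
            (pvEntries row).foldl (fun d p => d.modify p.1 [] (· ++ [p.2])) d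
          else d) _ ?_]
      · rw [pv_foldl_flat]
        rw [pv_bucket _ (pv_flat_keys rest (fun row h1 h2 => (hrows row h1 h2).1)) _ _ _ _ _ _ _]
        simp only [List.nil_append]
        have hkeys : (mkWeek (pvF "MONDAY" (pvFlat rest)) (pvF "TUESDAY" (pvFlat rest))
            (pvF "WEDNESDAY" (pvFlat rest)) (pvF "THURSDAY" (pvFlat rest)) (pvF "FRIDAY" (pvFlat rest))
            (pvF "SATURDAY" (pvFlat rest)) (pvF "SUNDAY" (pvFlat rest))).keys = pvWeek := rfl
        rw [hkeys, pv_sort_fold]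
      · intro d row hmem
        by_cases h : (2:Int) ≤ PySem.List.len row
        · simp only [if_pos h]
          exact pv_row_eq row ((hrows row hmem (by simpa [PySem.List.len_eq] using h)).1) d
        · simp only [if_neg h]
    -- B side
    have hB : To_do_List_alt (hd :: rest)
        = pvWeek.map (fun day => (day,
            PySem.List.sorted (((pvFlat rest).filter (fun p => p.1 == day)).map (·.2))
              (fun x => PySem.List.pyGetD x 1 ""))) := by
      simp only [To_do_List_alt]
      have hent : rest.foldl (fun acc row =>
            if 2 ≤ PySem.List.len row then
              (PySem.Str.split₀ (PySem.Str.upper (PySem.List.pyGetD row 1 ""))).foldl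
                (fun acc code => acc ++
                  [(pvDayMap.getD code "", [PySem.List.pyGetD row 0 "", PySem.List.pyGetD row 2 ""])]) acc
            else acc) [] = pvFlat rest := by
        have hbody : ∀ (acc : List (String × List String)) (row : List String),
            (PySem.Str.split₀ (PySem.Str.upper (PySem.List.pyGetD row 1 ""))).foldl
              (fun acc code => acc ++
                [(pvDayMap.getD code "", [PySem.List.pyGetD row 0 "", PySem.List.pyGetD row 2 ""])]) acc
            = acc ++ pvEntries row := by
          intro acc row
          rw [PySem.List.foldl_append_singleton_eq_map]
          simp [pvEntries]
        simp only [hbody]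
        rw [pv_entries_flat rest []]
        simp
      rw [hent]
    rw [hA, hB]
    simp [mkWeek, pvWeek, pvF]
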